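-- pv_equiv track=rewrite | github.com/aichingert/aoc | 2015/python/16.py | part2
-- ===== SOURCE A (Python) =====
-- S = {"children": 3, "cats": 7, "samoyeds": 2, "pomeranians": 3, "akitas": 0, "vizslas": 0, "goldfish": 5, "trees": 3, "cars": 2, "perfumes": 1}
--
-- def part2(aunts):
--     ans = ("", 0)
--
--     for aunt in aunts:
--         cur = 0
--         for k in S.keys():
--             if k in aunt[1]:
--                 if k == "cats" or k == "trees":
--                     if S[k] <= aunt[1][k]:
--                         cur += 1
--                 elif k == "pomeranians" or k == "goldfish":
--                     if S[k] >= aunt[1][k]: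
--                         cur += 1
--                 else:
--                     if S[k] == aunt[1][k]:
--                         cur += 1
--
--         if cur > ans[1]:
--             ans = (aunt[0], cur)
--
--     return ans[0]
-- ===== SOURCE B (Python) =====
-- S = {"children": 3, "cats": 7, "samoyeds": 2, "pomeranians": 3, "akitas": 0, "vizslas": 0, "goldfish": 5, "trees": 3, "cars": 2, "perfumes": 1}
--
-- def _ok(k, s, v):
--     if k == "cats" or k == "trees":
--         return s <= v
--     if k == "pomeranians" or k == "goldfish":
--         return s >= v
--     return s == v
--
-- def part2(aunts):
--     # criterion-major tally: one pass per criterion over a vector of counts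
--     counts = [0] * len(aunts)
--     for k, s in S.items():
--         counts = [c + 1 if k in aunt[1] and _ok(k, s, aunt[1][k]) else c
--                   for aunt, c in zip(aunts, counts)]
--     m = max(counts, default=0)
--     if m == 0:
--         return ""
--     for aunt, c in zip(aunts, counts):
--         if c == m:
--             return aunt[0]
-- ===== Notes on version B (the rewrite author's own statement) =====
-- stated objective: alternative
-- what changed: A's aunt-major nested loop with a running (name,best) accumulator is replaced by a transposed, criterion-major algorithm: one pass per criterion of S updates a tally vector counts over zip(aunts,counts), then the winner is read off in two staged scans (max of the tally vector, then the first aunt whose tally equals it).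
import Mathlib
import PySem

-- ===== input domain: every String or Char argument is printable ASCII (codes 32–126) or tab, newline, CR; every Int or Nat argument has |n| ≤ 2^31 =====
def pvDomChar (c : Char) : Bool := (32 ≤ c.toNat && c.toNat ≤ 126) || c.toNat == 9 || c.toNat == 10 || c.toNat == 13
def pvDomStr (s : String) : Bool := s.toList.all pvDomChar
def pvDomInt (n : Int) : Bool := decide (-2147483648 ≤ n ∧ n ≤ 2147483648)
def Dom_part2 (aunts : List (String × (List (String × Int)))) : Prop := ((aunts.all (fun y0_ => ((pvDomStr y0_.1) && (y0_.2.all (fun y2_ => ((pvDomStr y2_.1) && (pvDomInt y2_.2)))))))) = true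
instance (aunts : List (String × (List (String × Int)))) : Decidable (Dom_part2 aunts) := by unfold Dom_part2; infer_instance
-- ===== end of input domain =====

-- B transposes A's loops: instead of A's aunt-major nested loop with a running (name, best)
-- accumulator, B makes one pass per criterion of S over a tally vector counts (zipped with
-- aunts), then reads the winner off in two staged scans: max of the tally vector, then the
-- first aunt whose tally equals it (objective: alternative).

-- ===== PORT A =====
-- the module constant S (a dict literal)
def pvS : PySem.Dict String Int :=
  PySem.Dict.ofList [("children", 3), ("cats", 7), ("samoyeds", 2), ("pomeranians", 3),
    ("akitas", 0), ("vizslas", 0), ("goldfish", 5), ("trees", 3), ("cars", 2), ("perfumes", 1)]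

-- literal port of A: for each aunt an inner loop over S.keys() counting matches, then the
-- accumulator update 'if cur > ans[1]'.  S[k] and aunt[1][k] are ported as getD: both
-- lookups are guarded (k ranges over S's own keys; 'k in aunt[1]' was just tested), so
-- Python's [] cannot raise here and getD is exact.
def part2 (aunts : List (String × (List (String × Int)))) : String :=
  (aunts.foldl (fun ans aunt =>
      let d := PySem.Dict.ofList aunt.2
      let cur : Int := pvS.keys.foldl (fun cur k =>
        if d.contains k then
          if k = "cats" ∨ k = "trees" then
            (if pvS.getD k 0 ≤ d.getD k 0 then cur + 1 else cur)
          else if k = "pomeranians" ∨ k = "goldfish" then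
            (if pvS.getD k 0 ≥ d.getD k 0 then cur + 1 else cur)
          else
            (if pvS.getD k 0 = d.getD k 0 then cur + 1 else cur)
        else cur) 0
      if cur > ans.2 then (aunt.1, cur) else ans) ("", (0 : Int))).1

-- ===== PORT B =====
-- _ok(k, s, v): the comparison for criterion k
def pvOk (k : String) (s v : Int) : Bool :=
  if k = "cats" ∨ k = "trees" then s ≤ v
  else if k = "pomeranians" ∨ k = "goldfish" then s ≥ v
  else s = v

-- 'k in aunt[1] and _ok(k, s, aunt[1][k])' (the [k] lookup is guarded, so getD is exact)
def pvHit (k : String) (s : Int) (aunt : String × (List (String × Int))) : Bool :=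
  let d := PySem.Dict.ofList aunt.2
  d.contains k && pvOk k s (d.getD k 0)

-- literal port of B: criterion-major tally passes, then max(counts, default=0), then the
-- first-hit scan over zip(aunts, counts).  The 'none' arm of the scan is unreachable
-- (when m ≠ 0 the maximum m occurs in counts).
def part2_alt (aunts : List (String × (List (String × Int)))) : String :=
  let counts : List Int := pvS.items.foldl (fun cs p =>
      (aunts.zip cs).map (fun q => if pvHit p.1 p.2 q.1 then q.2 + 1 else q.2))
    (List.replicate aunts.length (0 : Int))
  let m : Int := (PySem.List.max? counts (fun c => c)).getD 0
  if m = 0 then ""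
  else
    match (aunts.zip counts).find? (fun q => q.2 == m) with
    | some q => q.1.1
    | none => ""

-- ===== PRECONDITION & SPEC =====
def Spec_part2 (aunts : List (String × (List (String × Int)))) (out : String) : Prop := out = part2_alt aunts
instance (aunts : List (String × (List (String × Int)))) (out : String) : Decidable (Spec_part2 aunts out) := by unfold Spec_part2; infer_instance

-- ===== CLAIM (what is proved, stated in full; the proofs are below) =====
def Claim_equal_part2 : Prop := ∀ (aunts : List (String × (List (String × Int)))), Dom_part2 aunts → Spec_part2 aunts (part2 aunts)

-- ===== LEMMAS AND PROOFS =====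

-- the per-aunt score, phrased as B's per-criterion indicators folded over S.items
def pvScore (aunt : String × (List (String × Int))) : Int :=
  pvS.items.foldl (fun c p => if pvHit p.1 p.2 aunt then c + 1 else c) 0

theorem pvScore_nonneg (aunt : String × (List (String × Int))) : 0 ≤ pvScore aunt := by
  unfold pvScore
  rw [PySem.List.foldl_if_add_one]
  positivity

-- mapping over a list zipped with its own image
theorem zip_map_self {α : Type} (l : List α) (h : α → Int) (F : α × Int → Int) :
    ((l.zip (l.map h)).map F) = l.map (fun a => F (a, h a)) := by
  induction l with
  | nil => rfl
  | cons a t ih => simp [ih]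

-- loop interchange: the criterion-major tally passes compute the aunt-major scores
theorem interchange {β : Type} (keys : List β) (l : List (String × (List (String × Int))))
    (g : β → (String × (List (String × Int))) → Bool) :
    ∀ init : (String × (List (String × Int))) → Int,
    keys.foldl (fun cs p => (l.zip cs).map (fun q => if g p q.1 then q.2 + 1 else q.2)) (l.map init)
      = l.map (fun a => keys.foldl (fun c p => if g p a then c + 1 else c) (init a)) := by
  induction keys with
  | nil => intro init; rfl
  | cons k t ih =>
    intro init
    simp only [List.foldl_cons]
    rw [zip_map_self l init (fun q => if g k q.1 then q.2 + 1 else q.2)]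
    exact ih (fun a => if g k a then init a + 1 else init a)

theorem counts_eq_map_score (aunts : List (String × (List (String × Int)))) :
    pvS.items.foldl (fun cs p =>
        (aunts.zip cs).map (fun q => if pvHit p.1 p.2 q.1 then q.2 + 1 else q.2))
      (List.replicate aunts.length (0 : Int))
      = aunts.map pvScore := by
  have hrep : List.replicate aunts.length (0 : Int) = aunts.map (fun _ => 0) := by
    simp
  rw [hrep, interchange pvS.items aunts (fun p a => pvHit p.1 p.2 a) (fun _ => 0)]
  rfl

-- every (k, s) in S.items has s = S.getD k 0
theorem pvS_items_val : ∀ p ∈ pvS.items, pvS.getD p.1 0 = p.2 := by decide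

-- A's inner loop over S.keys computes pvScore
theorem innerA_eq_score (aunt : String × (List (String × Int))) :
    (pvS.keys.foldl (fun cur k =>
        if (PySem.Dict.ofList aunt.2).contains k then
          if k = "cats" ∨ k = "trees" then
            (if pvS.getD k 0 ≤ (PySem.Dict.ofList aunt.2).getD k 0 then cur + 1 else cur)
          else if k = "pomeranians" ∨ k = "goldfish" then
            (if pvS.getD k 0 ≥ (PySem.Dict.ofList aunt.2).getD k 0 then cur + 1 else cur)
          else
            (if pvS.getD k 0 = (PySem.Dict.ofList aunt.2).getD k 0 then cur + 1 else cur)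
        else cur) 0)
    = pvScore aunt := by
  have hkeys : pvS.keys = pvS.items.map Prod.fst := rfl
  rw [hkeys, List.foldl_map]
  unfold pvScore
  apply PySem.List.foldl_congr_mem
  intro cur p hp
  have hs : pvS.getD p.1 0 = p.2 := pvS_items_val p hp
  unfold pvHit pvOk
  rw [hs]
  cases hc : (PySem.Dict.ofList aunt.2).contains p.1 with
  | false => simp [hc]
  | true =>
    simp only [hc, Bool.true_and]
    by_cases h1 : p.1 = "cats" ∨ p.1 = "trees"
    · by_cases h2 : p.2 ≤ (PySem.Dict.ofList aunt.2).getD p.1 0 <;> simp [h1, h2]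
    · by_cases h3 : p.1 = "pomeranians" ∨ p.1 = "goldfish"
      · by_cases h4 : p.2 ≥ (PySem.Dict.ofList aunt.2).getD p.1 0 <;> simp [h1, h3, h4]
      · by_cases h5 : p.2 = (PySem.Dict.ofList aunt.2).getD p.1 0 <;> simp [h1, h3, h5]

-- the step function of max? with key pvScore
def pvStep (acc : Option (String × (List (String × Int)))) (x : String × (List (String × Int))) :
    Option (String × (List (String × Int))) :=
  match acc with
  | none => some x
  | some m => if pvScore m < pvScore x then some x else some m

theorem max?_eq_foldl_pvStep (xs : List (String × (List (String × Int)))) :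
    PySem.List.max? xs pvScore = xs.foldl pvStep none := by
  unfold PySem.List.max?
  congr 1
  funext acc x
  cases acc <;> rfl

-- max? restarted from 'some a'
theorem max?_from_some (t : List (String × (List (String × Int)))) :
    ∀ a, (t.foldl pvStep (some a))
      = (match PySem.List.max? t pvScore with
         | none => some a
         | some m => if pvScore a < pvScore m then some m else some a) := by
  induction t with
  | nil => intro a; simp [PySem.List.max?]
  | cons b t' ih =>
    intro a
    have hmax : PySem.List.max? (b :: t') pvScore = t'.foldl pvStep (some b) := by
      rw [max?_eq_foldl_pvStep]; rfl
    have hstep : pvStep (some a) b = if pvScore a < pvScore b then some b else some a := rfl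
    simp only [List.foldl_cons, hstep]
    by_cases hab : pvScore a < pvScore b
    · rw [if_pos hab, ih b, hmax, ih b]
      cases h : PySem.List.max? t' pvScore with
      | none => simp [hab]
      | some m' =>
        by_cases hbm : pvScore b < pvScore m'
        · simp only [if_pos hbm]
          rw [if_pos (lt_trans hab hbm)]
        · simp only [if_neg hbm]
          rw [if_pos hab]
    · rw [if_neg hab, ih a, hmax, ih b]
      cases h : PySem.List.max? t' pvScore with
      | none => simp [hab]
      | some m' =>
        by_cases hbm : pvScore b < pvScore m'
        · simp only [if_pos hbm]
        · simp only [if_neg hbm]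
          have hnm : ¬ pvScore a < pvScore m' := by omega
          rw [if_neg hnm, if_neg hab]

-- A's accumulator loop, against max?
theorem foldA_eq_max? (aunts : List (String × (List (String × Int)))) :
    ∀ (n : String) (s : Int), 0 ≤ s →
    (aunts.foldl (fun ans aunt =>
        if pvScore aunt > ans.2 then (aunt.1, pvScore aunt) else ans) (n, s))
      = (match PySem.List.max? aunts pvScore with
         | none => (n, s)
         | some m => if s < pvScore m then (m.1, pvScore m) else (n, s)) := by
  induction aunts with
  | nil => intro n s _; simp [PySem.List.max?]
  | cons a t ih =>
    intro n s hs
    have hmax : PySem.List.max? (a :: t) pvScore = t.foldl pvStep (some a) := by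
      rw [max?_eq_foldl_pvStep]; rfl
    simp only [List.foldl_cons, gt_iff_lt]
    rw [hmax, max?_from_some t a]
    by_cases hsa : s < pvScore a
    · rw [if_pos hsa, ih a.1 (pvScore a) (pvScore_nonneg a)]
      cases h : PySem.List.max? t pvScore with
      | none => simp [hsa]
      | some m =>
        by_cases ham : pvScore a < pvScore m
        · simp only [if_pos ham]
          rw [if_pos (lt_trans hsa ham)]
        · simp only [if_neg ham]
          rw [if_pos hsa]
    · rw [if_neg hsa, ih n s hs]
      cases h : PySem.List.max? t pvScore with
      | none => simp [hsa]
      | some m =>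
        by_cases ham : pvScore a < pvScore m
        · simp only [if_pos ham]
        · simp only [if_neg ham]
          have hnm : ¬ s < pvScore m := by omega
          rw [if_neg hnm, if_neg hsa]

-- A, rewritten through the score identity
theorem part2_eq_fold (aunts : List (String × (List (String × Int)))) :
    part2 aunts
      = (aunts.foldl (fun ans aunt =>
          if pvScore aunt > ans.2 then (aunt.1, pvScore aunt) else ans) ("", (0 : Int))).1 := by
  unfold part2
  congr 2
  funext ans aunt
  simp only [innerA_eq_score]

-- max? over the mapped list, with the identity key
def pvStepId (acc : Option Int) (x : Int) : Option Int :=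
  match acc with
  | none => some x
  | some m => if m < x then some x else some m

theorem max?_id_eq_foldl (xs : List Int) :
    PySem.List.max? xs (fun c => c) = xs.foldl pvStepId none := by
  unfold PySem.List.max?
  congr 1
  funext acc x
  cases acc <;> rfl

theorem foldl_stepId_map (l : List (String × (List (String × Int)))) :
    ∀ (acc : Option (String × (List (String × Int)))),
      (l.map pvScore).foldl pvStepId (acc.map pvScore) = (l.foldl pvStep acc).map pvScore := by
  induction l with
  | nil => intro acc; rfl
  | cons a t ih =>
    intro acc
    cases acc with
    | none => simpa using ih (some a)
    | some m =>
      simp only [List.map_cons, List.foldl_cons, Option.map_some, pvStepId, pvStep]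
      by_cases h : pvScore m < pvScore a
      · simpa [h] using ih (some a)
      · simpa [h] using ih (some m)

theorem max?_map (l : List (String × (List (String × Int)))) :
    PySem.List.max? (l.map pvScore) (fun c => c)
      = (PySem.List.max? l pvScore).map pvScore := by
  rw [max?_id_eq_foldl, max?_eq_foldl_pvStep]
  simpa using foldl_stepId_map l none

-- the first maximum is the first element achieving the maximal score
theorem find_first_max (l : List (String × (List (String × Int)))) :
    ∀ b, PySem.List.max? l pvScore = some b →
      l.find? (fun a => pvScore a == pvScore b) = some b := by
  induction l with
  | nil => intro b h; simp [PySem.List.max?] at h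
  | cons a t ih =>
    intro b h
    have hmax : PySem.List.max? (a :: t) pvScore = t.foldl pvStep (some a) := by
      rw [max?_eq_foldl_pvStep]; rfl
    rw [hmax, max?_from_some t a] at h
    cases hm : PySem.List.max? t pvScore with
    | none =>
      rw [hm] at h
      simp only at h
      cases h
      simp
    | some m =>
      rw [hm] at h
      simp only at h
      by_cases ham : pvScore a < pvScore m
      · rw [if_pos ham] at h
        cases h
        have hne : (pvScore a == pvScore b) = false := by
          simp only [beq_eq_false_iff_ne]; omega
        rw [List.find?_cons, hne]
        exact ih b hm
      · rw [if_neg ham] at h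
        cases h
        simp

-- find? over the zip with the score list
theorem find_zip_map (l : List (String × (List (String × Int)))) (m : Int) :
    (l.zip (l.map pvScore)).find? (fun q => q.2 == m)
      = (l.find? (fun a => pvScore a == m)).map (fun a => (a, pvScore a)) := by
  induction l with
  | nil => rfl
  | cons a t ih =>
    simp only [List.map_cons, List.zip_cons_cons, List.find?_cons]
    by_cases h : (pvScore a == m) = true
    · simp [h]
    · simp only [Bool.not_eq_true] at h
      simp [h, ih]

-- ===== VERDICT (by name: the statement is the Claim_ definition above) =====
theorem part2_spec : Claim_equal_part2 := by
  intro aunts _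
  unfold Spec_part2 part2_alt
  simp only [counts_eq_map_score]
  rw [part2_eq_fold, foldA_eq_max? aunts "" 0 le_rfl, max?_map]
  cases h : PySem.List.max? aunts pvScore with
  | none =>
    simp
  | some b =>
    have hnn := pvScore_nonneg b
    by_cases hz : pvScore b = 0
    · simp [hz]
    · have hpos : (0 : Int) < pvScore b := lt_of_le_of_ne hnn (Ne.symm hz)
      simp only [Option.map_some, Option.getD_some, if_neg hz, if_pos hpos]
      rw [find_zip_map, find_first_max aunts b h]
      rfl
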